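-- pv_equiv track=rewrite | github.com/dgiart/loop2020 | loop17_02_20/Energies.py | closest
-- ===== SOURCE A (Python) =====
-- def closest(array,value):
--     '''Given an ``array`` , and given a ``value`` , returns an index j such that ``value`` is between array[j]
--     and array[j+1]. ``array`` must be monotonic increasing. j=-1 or j=len(array) is returned
--     to indicate that ``value`` is out of range below and above respectively.'''
--     n = len(array)
--     # if (value < array[0]):
--     #     return -1
--     # elif (value > array[n-1]):
--     #     return n
--     jl = 0# Initialize lower
--     ju = n-1# and upper limits.
--     while (ju-jl > 1):# If we are not yet done,
--         jm=(ju+jl) >> 1# compute a midpoint with a bitshift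
--         if (value >= array[jm]):
--             jl=jm# and replace either the lower limit
--         else:
--             ju=jm# or the upper limit, as appropriate.
--         # Repeat until the test condition is satisfied.
--     if (value == array[0]):# edge cases at bottom
--         return 0
--     elif (value == array[n-1]):# and top
--         return n-1
--     else:
--         return array[jl]
-- ===== SOURCE B (Python) =====
-- def closest(array, value):
--     # Single linear pass instead of bisection: jl ends as the largest index in
--     # [0, n-2] with array[j] <= value (0 if none) on a nondecreasing array.
--     n = len(array)
--     jl = 0
--     for j in range(1, n - 1):
--         if value >= array[j]:
--             jl = j
--     if value == array[0]:
--         return 0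
--     elif value == array[n - 1]:
--         return n - 1
--     else:
--         return array[jl]
-- ===== Notes on version B (the rewrite author's own statement) =====
-- stated objective: simpler
-- what changed: Replaces the bisection while-loop (midpoint bitshift, lower/upper limits) with a single left-to-right pass that keeps the last index whose element is <= value; the edge-case tail is unchanged. Pre_ excludes empty arrays, on which A raises IndexError, and arrays of length >= 4 that are not nondecreasing with value at neither endpoint: those violate the documented 'array must be monotonic increasing' contract, and there bisection and a linear scan legitimately pick different indices.
-- outside the precondition, e.g. on closest([], 0): A raises IndexError, B raises IndexError; on closest([-2, 5, 0, -9], 4): A returns -2, B returns 0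
import Mathlib
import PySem

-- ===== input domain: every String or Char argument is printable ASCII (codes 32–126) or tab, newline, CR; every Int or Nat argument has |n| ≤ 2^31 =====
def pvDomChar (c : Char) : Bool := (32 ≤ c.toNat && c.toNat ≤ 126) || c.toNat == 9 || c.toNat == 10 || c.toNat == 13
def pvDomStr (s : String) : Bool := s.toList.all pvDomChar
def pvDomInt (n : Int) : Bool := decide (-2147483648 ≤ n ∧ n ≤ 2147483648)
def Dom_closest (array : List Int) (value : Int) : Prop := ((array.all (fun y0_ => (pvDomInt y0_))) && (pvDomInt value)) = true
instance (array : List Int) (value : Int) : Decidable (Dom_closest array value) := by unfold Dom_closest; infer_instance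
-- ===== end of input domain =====

-- B replaces A's bisection loop with one linear pass keeping the last index whose
-- element is <= value (objective: simpler); same edge-case tail, same return value.

-- ===== PORT A =====
-- the while-loop of A; indexing uses pyGetD with default 0, exact here because
-- under Pre_ (nonempty array) every index reached lies in range
def closestLoop (array : List Int) (value : Int) (jl ju : Int) : Int :=
  if ju - jl > 1 then
    let jm := PySem.Int.floordiv (ju + jl) 2   -- (ju+jl) >> 1
    if value ≥ PySem.List.pyGetD array jm 0 then
      closestLoop array value jm ju
    else
      closestLoop array value jl jm
  else jl
termination_by (ju - jl).toNat
decreasing_by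
  all_goals
    rw [PySem.Int.floordiv_eq_ediv_of_pos (by omega : (0:Int) < 2)] at *
    omega

def closest (array : List Int) (value : Int) : Int :=
  let n : Int := array.length
  let jl := closestLoop array value 0 (n - 1)
  if value = PySem.List.pyGetD array 0 0 then 0
  else if value = PySem.List.pyGetD array (n - 1) 0 then n - 1
  else PySem.List.pyGetD array jl 0

-- ===== PORT B =====
def closest_alt (array : List Int) (value : Int) : Int :=
  let n : Int := array.length
  let jl := (PySem.List.pyRange 1 (n - 1) 1).foldl
      (fun jl j => if value ≥ PySem.List.pyGetD array j 0 then j else jl) 0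
  if value = PySem.List.pyGetD array 0 0 then 0
  else if value = PySem.List.pyGetD array (n - 1) 0 then n - 1
  else PySem.List.pyGetD array jl 0

-- ===== PRECONDITION & SPEC =====
-- Pre_ excludes empty arrays, on which A raises IndexError, and arrays of length ≥ 4
-- that are not nondecreasing (with value at neither endpoint): those violate A's documented
-- 'array must be monotonic increasing' contract, and there bisection and a linear scan
-- legitimately pick different indices.
def Pre_closest (array : List Int) (value : Int) : Prop :=
  array ≠ [] ∧ (array.Pairwise (· ≤ ·) ∨ array.length ≤ 3 ∨
    value = PySem.List.pyGetD array 0 0 ∨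
    value = PySem.List.pyGetD array ((array.length : Int) - 1) 0)
instance (array : List Int) (value : Int) : Decidable (Pre_closest array value) := by
  unfold Pre_closest; infer_instance

def pvWitness_closest : List Int × Int := ([0, 2, 5], 3)

def Spec_closest (array : List Int) (value : Int) (out : Int) : Prop := out = closest_alt array value
instance (array : List Int) (value : Int) (out : Int) : Decidable (Spec_closest array value out) := by unfold Spec_closest; infer_instance

-- ===== CLAIM (what is proved, stated in full; the proofs are below) =====
def Claim_equal_closest : Prop := ∀ (array : List Int) (value : Int), Dom_closest array value → Pre_closest array value → Spec_closest array value (closest array value)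

-- ===== LEMMAS AND PROOFS =====

-- both loops compute the unique r with: r ∈ [0, n-2], (r = 0 or array[r] ≤ value),
-- and value < array[j] for every j with r < j ≤ n-2
def pvGood (array : List Int) (value : Int) (r : Int) : Prop :=
  0 ≤ r ∧ r ≤ (array.length : Int) - 2 ∧
  (r = 0 ∨ PySem.List.pyGetD array r 0 ≤ value) ∧
  ∀ j : Int, r < j → j ≤ (array.length : Int) - 2 → value < PySem.List.pyGetD array j 0

theorem pvGood_unique (array : List Int) (value : Int) (r₁ r₂ : Int)
    (h₁ : pvGood array value r₁) (h₂ : pvGood array value r₂) : r₁ = r₂ := by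
  obtain ⟨h₁0, h₁b, h₁v, h₁m⟩ := h₁
  obtain ⟨h₂0, h₂b, h₂v, h₂m⟩ := h₂
  rcases lt_trichotomy r₁ r₂ with h | h | h
  · have := h₁m r₂ h h₂b
    rcases h₂v with rfl | hv <;> omega
  · exact h
  · have := h₂m r₁ h h₁b
    rcases h₁v with rfl | hv <;> omega

theorem pvSorted_le (array : List Int) (hs : array.Pairwise (· ≤ ·))
    (i k : Int) (hi : 0 ≤ i) (hik : i ≤ k) (hk : k < (array.length : Int)) :
    PySem.List.pyGetD array i 0 ≤ PySem.List.pyGetD array k 0 := by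
  have hik' : i.toNat ≤ k.toNat := by omega
  have hkl : k.toNat < array.length := by omega
  have hil : i.toNat < array.length := by omega
  rw [PySem.List.pyGetD_eq_getElem array 0 hi (by omega),
    PySem.List.pyGetD_eq_getElem array 0 (by omega : (0:Int) ≤ k) (by omega)]
  rcases Nat.lt_or_ge i.toNat k.toNat with hlt | hge
  · exact (List.pairwise_iff_getElem.mp hs) i.toNat k.toNat hil hkl hlt
  · have : i.toNat = k.toNat := by omega
    simp [this]

theorem pvLoop_good (array : List Int) (value : Int) (hs : array.Pairwise (· ≤ ·)) :
    ∀ jl ju : Int, 0 ≤ jl → ju ≤ (array.length : Int) - 1 → jl < ju →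
    (jl = 0 ∨ PySem.List.pyGetD array jl 0 ≤ value) →
    (ju = (array.length : Int) - 1 ∨ value < PySem.List.pyGetD array ju 0) →
    pvGood array value (closestLoop array value jl ju) := by
  suffices h : ∀ (k : Nat) (jl ju : Int), (ju - jl).toNat ≤ k → 0 ≤ jl →
      ju ≤ (array.length : Int) - 1 → jl < ju →
      (jl = 0 ∨ PySem.List.pyGetD array jl 0 ≤ value) →
      (ju = (array.length : Int) - 1 ∨ value < PySem.List.pyGetD array ju 0) →
      pvGood array value (closestLoop array value jl ju) by
    intro jl ju h0 hub hlt hjl hju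
    exact h (ju - jl).toNat jl ju le_rfl h0 hub hlt hjl hju
  intro k
  induction k with
  | zero =>
    intro jl ju hk h0 hub hlt hjl hju
    exact absurd hk (by omega)
  | succ k IH =>
    intro jl ju hk h0 hub hlt hjl hju
    rw [closestLoop]
    by_cases hgt : ju - jl > 1
    · rw [if_pos hgt]
      show pvGood array value
        (if value ≥ PySem.List.pyGetD array (PySem.Int.floordiv (ju + jl) 2) 0 then
          closestLoop array value (PySem.Int.floordiv (ju + jl) 2) ju
         else closestLoop array value jl (PySem.Int.floordiv (ju + jl) 2))
      have hb : jl + 1 ≤ PySem.Int.floordiv (ju + jl) 2 ∧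
          PySem.Int.floordiv (ju + jl) 2 ≤ ju - 1 := by
        rw [PySem.Int.floordiv_eq_ediv_of_pos (by norm_num)]
        omega
      split_ifs with hge
      · exact IH _ ju (by omega) (by omega) hub (by omega) (Or.inr hge) hju
      · exact IH jl _ (by omega) h0 (by omega) (by omega) hjl (Or.inr (not_le.mp hge))
    · rw [if_neg hgt]
      refine ⟨h0, by omega, hjl, ?_⟩
      intro j hj hjb
      rcases hju with h1 | h2
      · exact absurd hjb (by omega)
      · calc value < PySem.List.pyGetD array ju 0 := h2
          _ ≤ PySem.List.pyGetD array j 0 :=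
            pvSorted_le array hs ju j (by omega) (by omega) (by omega)

theorem pvFold_good (array : List Int) (value : Int) (m : Nat) :
    (((PySem.List.pyRange 1 (m : Int) 1).foldl
        (fun jl j => if value ≥ PySem.List.pyGetD array j 0 then j else jl) 0) = 0 ∨
      (1 ≤ ((PySem.List.pyRange 1 (m : Int) 1).foldl
        (fun jl j => if value ≥ PySem.List.pyGetD array j 0 then j else jl) 0) ∧
       ((PySem.List.pyRange 1 (m : Int) 1).foldl
        (fun jl j => if value ≥ PySem.List.pyGetD array j 0 then j else jl) 0) ≤ (m : Int) - 1 ∧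
       PySem.List.pyGetD array ((PySem.List.pyRange 1 (m : Int) 1).foldl
        (fun jl j => if value ≥ PySem.List.pyGetD array j 0 then j else jl) 0) 0 ≤ value)) ∧
    ∀ j : Int, ((PySem.List.pyRange 1 (m : Int) 1).foldl
        (fun jl j => if value ≥ PySem.List.pyGetD array j 0 then j else jl) 0) < j →
      j < (m : Int) → value < PySem.List.pyGetD array j 0 := by
  induction m with
  | zero =>
    rw [PySem.List.pyRange_one_eq_nil (by omega)]
    simp only [List.foldl_nil]
    refine ⟨Or.inl trivial, ?_⟩
    intro j h1 h2
    exact absurd h2 (by omega)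
  | succ m IH =>
    by_cases hm : m = 0
    · subst hm
      rw [PySem.List.pyRange_one_eq_nil (by omega)]
      simp only [List.foldl_nil]
      refine ⟨Or.inl trivial, ?_⟩
      intro j h1 h2
      exact absurd h1 (by omega)
    · have hcast : ((m + 1 : Nat) : Int) = (m : Int) + 1 := by push_cast; ring
      rw [hcast, PySem.List.pyRange_one_succ_right (by omega), List.foldl_append]
      simp only [List.foldl_cons, List.foldl_nil]
      obtain ⟨IH1, IH2⟩ := IH
      split_ifs with hge
      · refine ⟨Or.inr ⟨by omega, by omega, hge⟩, ?_⟩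
        intro j hj hjb
        exact absurd hjb (by omega)
      · constructor
        · rcases IH1 with h | h
          · exact Or.inl h
          · exact Or.inr ⟨h.1, by omega, h.2.2⟩
        · intro j hj hjb
          by_cases hjm : j = (m : Int)
          · subst hjm
            exact not_le.mp hge
          · exact IH2 j hj (by omega)

-- ===== VERDICT (by name: the statement is the Claim_ definition above) =====
theorem pvKey (array : List Int) (value : Int) (hs : array.Pairwise (· ≤ ·))
    (hlen : 1 ≤ array.length) :
    closestLoop array value 0 ((array.length : Int) - 1) =
      (PySem.List.pyRange 1 ((array.length : Int) - 1) 1).foldl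
        (fun jl j => if value ≥ PySem.List.pyGetD array j 0 then j else jl) 0 := by
  by_cases h1 : array.length = 1
  · rw [h1]
    norm_num
    rw [closestLoop]
    norm_num
  · have h2 : 2 ≤ array.length := by omega
    have hfold := pvFold_good array value (array.length - 1)
    have hcast : ((array.length - 1 : Nat) : Int) = (array.length : Int) - 1 := by omega
    rw [hcast] at hfold
    obtain ⟨hf1, hf2⟩ := hfold
    refine pvGood_unique array value _ _
      (pvLoop_good array value hs 0 ((array.length : Int) - 1) le_rfl le_rfl (by omega)
        (Or.inl rfl) (Or.inl rfl)) ?_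
    refine ⟨?_, ?_, ?_, ?_⟩
    · rcases hf1 with h | h
      · omega
      · omega
    · rcases hf1 with h | h
      · omega
      · omega
    · rcases hf1 with h | h
      · exact Or.inl h
      · exact Or.inr h.2.2
    · intro j hj hjb
      exact hf2 j hj (by omega)

theorem pvShort (array : List Int) (value : Int) (h1 : 1 ≤ array.length)
    (h3 : array.length ≤ 3) :
    closestLoop array value 0 ((array.length : Int) - 1) =
      (PySem.List.pyRange 1 ((array.length : Int) - 1) 1).foldl
        (fun jl j => if value ≥ PySem.List.pyGetD array j 0 then j else jl) 0 := by
  rcases (by omega : array.length = 1 ∨ array.length = 2 ∨ array.length = 3) with h | h | h <;>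
    rw [h]
  · norm_num
    rw [closestLoop]
    norm_num
  · norm_num
    rw [closestLoop]
    norm_num
  · norm_num
    rw [closestLoop, PySem.List.pyRange_one_cons (by norm_num),
      PySem.List.pyRange_one_eq_nil (by norm_num)]
    norm_num
    split_ifs with hge <;> rw [closestLoop] <;> norm_num

theorem closest_spec : Claim_equal_closest := by
  intro array value hdom hpre
  obtain ⟨hne, hcond⟩ := hpre
  have hlen : 1 ≤ array.length := List.length_pos_of_ne_nil hne
  unfold Spec_closest
  simp only [closest, closest_alt]
  by_cases hv0 : value = PySem.List.pyGetD array 0 0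
  · simp [hv0]
  by_cases hvl : value = PySem.List.pyGetD array ((array.length : Int) - 1) 0
  · simp [hvl]
  rw [if_neg hv0, if_neg hvl, if_neg hv0, if_neg hvl]
  rcases hcond with hs | hsh | h | h
  · rw [pvKey array value hs hlen]
  · rw [pvShort array value hlen hsh]
  · exact absurd h hv0
  · exact absurd h hvl
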